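-- pv_equiv track=rewrite | github.com/wackywendell/Scripts | pychall/euler103.py | checkoptold
-- ===== SOURCE A (Python) =====
-- from collections import defaultdict
-- from itertools import combinations, chain
--
-- def subsets(iterable, maxlen = None):
--     s = list(iterable)
--     if maxlen == None:
--         maxlen = len(s)
--     else:
--         maxlen = min(maxlen, len(s))
--     return chain.from_iterable(combinations(s, r) for r in range(1,maxlen+1))
--
-- def checkoptold(s):
--     d = defaultdict(set) # dictionary of subsetlen : set(lengths of subsets of this len)
--     for sub in subsets(s):
--         subsum = sum(sub)
--         sublen = len(sub)
--         sublens = d[sublen]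
--         if subsum in sublens:
--             return False
--         sublens.add(subsum)
--
--     lens = sorted(d.keys())
--
--     allsublens = set((0,))
--     for length in lens:
--         cursublens = d[length]
--         curmax = max(allsublens)
--         for sublen in cursublens:
--             if sublen < curmax:
--                 return False
--         allsublens = allsublens.union(cursublens)
--     return True
-- ===== SOURCE B (Python) =====
-- from itertools import combinations
--
-- def checkoptold(s):
--     prev_max = 0
--     for r in range(1, len(s) + 1):
--         sums = [sum(c) for c in combinations(s, r)]
--         if len(set(sums)) != len(sums):
--             return False
--         if min(sums) < prev_max:
--             return False
--         prev_max = max(sums)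
--     return True
-- ===== Notes on version B (the rewrite author's own statement) =====
-- stated objective: simpler
-- what changed: Replaces A's flat chained-subsets loop with a defaultdict of per-size sum-sets plus a separate sorted-keys monotonicity pass by a single loop over subset sizes r = 1..n that checks each size's sum list for duplicates and against a running maximum, keeping only one integer of state instead of a dict of sets.
import Mathlib
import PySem

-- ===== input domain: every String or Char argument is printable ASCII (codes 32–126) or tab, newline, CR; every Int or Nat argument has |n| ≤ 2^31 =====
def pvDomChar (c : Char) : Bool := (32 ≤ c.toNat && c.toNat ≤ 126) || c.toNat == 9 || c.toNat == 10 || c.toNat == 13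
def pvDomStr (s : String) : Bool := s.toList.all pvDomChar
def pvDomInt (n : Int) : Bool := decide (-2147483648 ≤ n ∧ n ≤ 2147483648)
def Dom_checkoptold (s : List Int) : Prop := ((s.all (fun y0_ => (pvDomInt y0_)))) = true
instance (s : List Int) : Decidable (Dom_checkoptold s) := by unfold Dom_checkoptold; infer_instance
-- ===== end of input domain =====

-- B replaces A's flat subset chain + defaultdict-of-sets + separate sorted-keys monotonicity pass
-- by one loop over subset sizes keeping only a running maximum (objective: simpler).

-- ===== PORT A =====
-- subsets(s): chain of combinations(s, r) for r in range(1, len(s)+1)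
def pySubsets (s : List Int) : List (List Int) :=
  (PySem.List.pyRange 1 ((s.length : Int) + 1) 1).flatMap
    (fun r => PySem.List.combinations s r.toNat)

-- first for-loop of A: fill d (defaultdict(set)), early `return False` = none
def loopA : List (List Int) → PySem.Dict Int (PySem.Set Int) →
    Option (PySem.Dict Int (PySem.Set Int))
  | [], d => some d
  | sub :: rest, d =>
      let subsum := sub.sum
      let sublen : Int := (sub.length : Int)
      let sublens := d.getD sublen PySem.Set.empty
      if PySem.Set.contains sublens subsum then none
      else loopA rest (d.insert sublen (PySem.Set.add sublens subsum))

-- second for-loop of A over the sorted keys; the inner `for sublen in cursublens: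
-- if sublen < curmax: return False` is the order-independent List.any test
def loopA2 (d : PySem.Dict Int (PySem.Set Int)) : List Int → PySem.Set Int → Bool
  | [], _ => true
  | lenKey :: rest, allsublens =>
      let cur := d.getD lenKey PySem.Set.empty
      match PySem.List.max? allsublens (fun x => x) with
      | none => false   -- totality guard: Python's max would raise; unreachable, allsublens ⊇ {0}
      | some curmax =>
        if cur.any (fun x => decide (x < curmax)) then false
        else loopA2 d rest (PySem.Set.union allsublens cur)

def checkoptold (s : List Int) : Bool :=
  match loopA (pySubsets s) PySem.Dict.empty with
  | none => false
  | some d => loopA2 d (PySem.List.sorted d.keys (fun x => x) false) (PySem.Set.ofList [0])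

-- ===== PORT B =====
-- one pass over sizes r = 1..len(s), keeping only prev_max
def loopB (s : List Int) : List Int → Int → Bool
  | [], _ => true
  | r :: rs, prevMax =>
      let sums := (PySem.List.combinations s r.toNat).map (fun c => c.sum)
      if (PySem.Set.ofList sums).length ≠ sums.length then false
      else
        match PySem.List.min? sums (fun x => x), PySem.List.max? sums (fun x => x) with
        | some mn, some mx => if mn < prevMax then false else loopB s rs mx
        | _, _ => false   -- totality guard: Python's min/max would raise; unreachable for 1 ≤ r ≤ len(s)

def checkoptold_alt (s : List Int) : Bool :=
  loopB s (PySem.List.pyRange 1 ((s.length : Int) + 1) 1) 0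

-- ===== PRECONDITION & SPEC =====
def Spec_checkoptold (s : List Int) (out : Bool) : Prop := out = checkoptold_alt s
instance (s : List Int) (out : Bool) : Decidable (Spec_checkoptold s out) := by unfold Spec_checkoptold; infer_instance

-- ===== CLAIM (what is proved, stated in full; the proofs are below) =====
def Claim_equal_checkoptold : Prop := ∀ (s : List Int), Dom_checkoptold s → Spec_checkoptold s (checkoptold s)

-- ===== LEMMAS AND PROOFS =====

-- the multiset of sums of the size-r subsets
def sumsOf (s : List Int) (r : Nat) : List Int :=
  (PySem.List.combinations s r).map (fun c => c.sum)

-- "adding xs one by one into acc never hits a repeat"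
def noDupFrom (acc : PySem.Set Int) : List Int → Bool
  | [] => true
  | x :: xs => !(PySem.Set.contains acc x) && noDupFrom (PySem.Set.add acc x) xs

theorem noDupFrom_iff (acc : PySem.Set Int) (xs : List Int) :
    noDupFrom acc xs = true ↔ xs.Nodup ∧ ∀ x ∈ xs, x ∉ acc := by
  induction xs generalizing acc with
  | nil => simp [noDupFrom]
  | cons x xs ih =>
      have hcon : PySem.Set.contains acc x = false ↔ x ∉ acc := by
        rw [← PySem.Set.contains_iff acc x]; simp
      simp only [noDupFrom, Bool.and_eq_true, Bool.not_eq_true', List.nodup_cons, ih,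
        PySem.Set.mem_add, List.mem_cons, hcon]
      constructor
      · rintro ⟨hc, hnd, hmem⟩
        push_neg at hmem
        refine ⟨⟨fun hx => (hmem x hx).2 rfl, hnd⟩, ?_⟩
        rintro y (rfl | hy)
        · exact hc
        · exact (hmem y hy).1
      · rintro ⟨⟨hx, hnd⟩, hmem⟩
        refine ⟨hmem x (Or.inl rfl), hnd, ?_⟩
        intro y hy
        rintro (h | rfl)
        · exact hmem y (Or.inr hy) h
        · exact hx hy

theorem length_ofList_lt_of_not_nodup (xs : List Int) (h : ¬ xs.Nodup) :
    (PySem.Set.ofList xs).length < xs.length := by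
  induction xs with
  | nil => simp at h
  | cons x xs ih =>
      rw [PySem.Set.ofList_cons]
      have hdeq : PySem.Set.discard (PySem.Set.ofList xs) x =
          (PySem.Set.ofList xs).filter (fun y => !(y == x)) := rfl
      by_cases hx : x ∈ xs
      · have hx' : x ∈ PySem.Set.ofList xs := (PySem.Set.mem_ofList xs x).2 hx
        have hlt : ((PySem.Set.ofList xs).filter (fun y => !(y == x))).length <
            (PySem.Set.ofList xs).length := by
          apply List.length_filter_lt_length_iff_exists.2
          exact ⟨x, hx', by simp⟩
        have hle := PySem.Set.length_ofList_le xs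
        simp only [List.length_cons, hdeq]
        omega
      · have hxs : ¬ xs.Nodup := by
          simp only [List.nodup_cons] at h; tauto
        have := ih hxs
        have hdis : ((PySem.Set.ofList xs).filter (fun y => !(y == x))).length ≤
            (PySem.Set.ofList xs).length := List.length_filter_le _ _
        simp only [List.length_cons, hdeq]
        omega

theorem setLen_eq_iff_nodup (xs : List Int) :
    (PySem.Set.ofList xs).length = xs.length ↔ xs.Nodup := by
  constructor
  · intro h
    by_contra hnd
    exact absurd h (Nat.ne_of_lt (length_ofList_lt_of_not_nodup xs hnd))
  · intro h
    rw [PySem.Set.ofList_eq_self_of_nodup xs h]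

theorem combs_ne_nil (s : List Int) (r : Nat) (hr : r ≤ s.length) :
    PySem.List.combinations s r ≠ [] := by
  have : s.take r ∈ PySem.List.combinations s r :=
    (PySem.List.mem_combinations_iff s r _).2 ⟨List.take_sublist r s, List.length_take_of_le hr⟩
  intro h
  rw [h] at this
  exact absurd this (List.not_mem_nil)

theorem max?_eq_of_mem_of_forall_le (l : List Int) (m : Int) (hm : m ∈ l)
    (hle : ∀ y ∈ l, y ≤ m) : PySem.List.max? l (fun x => x) = some m := by
  cases hmx : PySem.List.max? l (fun x => x) with
  | none =>
      rw [PySem.List.max?_eq_none_iff _ _] at hmx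
      subst hmx; exact absurd hm (List.not_mem_nil)
  | some m' =>
      have h1 : m ≤ m' := PySem.List.max?_isMax hmx m hm
      have h2 : m' ≤ m := hle m' (PySem.List.max?_mem hmx)
      rw [le_antisymm h2 h1]

-- one block of A's first loop, over the size-r combinations
theorem loopA_block (r : Nat) (cs : List (List Int)) (hcs : ∀ c ∈ cs, c.length = r)
    (hne : cs ≠ []) (rest : List (List Int))
    (d : PySem.Dict Int (PySem.Set Int)) (acc : PySem.Set Int)
    (hacc : d.getD (r : Int) PySem.Set.empty = acc) :
    loopA (cs ++ rest) d =
      if noDupFrom acc (cs.map (fun c => c.sum))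
      then loopA rest (d.insert (r : Int) (PySem.Set.update acc (cs.map (fun c => c.sum))))
      else none := by
  induction cs generalizing d acc with
  | nil => exact absurd rfl hne
  | cons c cs ih =>
      have hc : c.length = r := hcs c (List.mem_cons_self)
      simp only [List.cons_append, loopA, hc, hacc, List.map_cons, noDupFrom,
        Bool.and_eq_true, Bool.not_eq_true']
      by_cases hcon : c.sum ∈ acc
      · simp [hcon]
      · cases cs with
        | nil =>
            simp [noDupFrom, PySem.Set.update_cons, PySem.Set.update_nil, hcon]
        | cons c' cs' =>
            rw [ih (fun x hx => hcs x (List.mem_cons_of_mem _ hx)) (by simp)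
              (d.insert (r : Int) (PySem.Set.add acc c.sum)) (PySem.Set.add acc c.sum)
              (PySem.Dict.getD_insert_self _ _ _ _)]
            rw [PySem.Dict.insert_insert_self, PySem.Set.update_cons]
            simp [hcon]

-- A's whole first loop over the blocks named by rls
theorem loopA_blocks (s : List Int) (rls : List Int)
    (hb : ∀ r ∈ rls, 1 ≤ r ∧ r ≤ (s.length : Int)) (hnd : rls.Nodup)
    (d : PySem.Dict Int (PySem.Set Int)) (hd : ∀ r ∈ rls, d.contains r = false) :
    loopA (rls.flatMap (fun r => PySem.List.combinations s r.toNat)) d =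
      if ∀ r ∈ rls, (sumsOf s r.toNat).Nodup
      then some (rls.foldl (fun d r => d.insert r (PySem.Set.ofList (sumsOf s r.toNat))) d)
      else none := by
  induction rls generalizing d with
  | nil => simp [loopA]
  | cons r rls ih =>
      have hr := hb r (List.mem_cons_self)
      have hrlen : r.toNat ≤ s.length := by omega
      have hcne : PySem.List.combinations s r.toNat ≠ [] := combs_ne_nil s r.toNat hrlen
      have hgd : d.getD (r.toNat : Int) PySem.Set.empty = PySem.Set.empty := by
        have : ((r.toNat : Nat) : Int) = r := by omega
        rw [this]
        exact PySem.Dict.getD_of_not_contains d PySem.Set.empty (hd r (List.mem_cons_self))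
      rw [List.flatMap_cons,
        loopA_block r.toNat _ (fun c hc => PySem.List.length_of_mem_combinations hc) hcne _ d
          PySem.Set.empty hgd]
      have hcast : ((r.toNat : Nat) : Int) = r := by omega
      have hdup : noDupFrom PySem.Set.empty ((PySem.List.combinations s r.toNat).map
          (fun c => c.sum)) = true ↔ (sumsOf s r.toNat).Nodup := by
        rw [noDupFrom_iff]
        simp [sumsOf, PySem.Set.empty]
      by_cases hn : (sumsOf s r.toNat).Nodup
      · rw [if_pos (hdup.2 hn)]
        rw [ih (fun x hx => hb x (List.mem_cons_of_mem _ hx)) (List.Nodup.of_cons hnd) _ ?_]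
        · rw [PySem.Set.update_empty, hcast]
          have : ((PySem.List.combinations s r.toNat).map (fun c => c.sum)) = sumsOf s r.toNat := rfl
          rw [this]
          simp only [List.foldl_cons]
          by_cases hall : ∀ x ∈ rls, (sumsOf s x.toNat).Nodup
          · simp [hn]
          · simp only [hall, if_false]
            rw [if_neg]
            intro hcall
            exact hall (fun x hx => hcall x (List.mem_cons_of_mem _ hx))
        · intro x hx
          rw [hcast, PySem.Dict.contains_insert]
          have hxr : x ≠ r := by
            intro h; subst h
            exact (List.nodup_cons.1 hnd).1 hx
          simp [hxr, hd x (List.mem_cons_of_mem _ hx)]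
      · rw [if_neg (fun h => hn (hdup.1 h))]
        rw [if_neg]
        intro hcall
        exact hn (hcall r (List.mem_cons_self))

-- lookups in the dict built by inserting each block once
theorem getD_foldl_not_mem (rls : List Int) (f : Int → PySem.Set Int)
    (d : PySem.Dict Int (PySem.Set Int)) (r : Int) (hr : r ∉ rls) :
    (rls.foldl (fun d x => d.insert x (f x)) d).getD r PySem.Set.empty
      = d.getD r PySem.Set.empty := by
  induction rls generalizing d with
  | nil => rfl
  | cons x rls ih =>
      simp only [List.foldl_cons]
      rw [ih _ (fun h => hr (List.mem_cons_of_mem _ h))]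
      exact PySem.Dict.getD_insert_of_ne _ _ _
        (by intro h; exact hr (by rw [h]; exact List.mem_cons_self))

theorem getD_foldl_mem (rls : List Int) (f : Int → PySem.Set Int)
    (d : PySem.Dict Int (PySem.Set Int)) (r : Int) (hr : r ∈ rls) (hnd : rls.Nodup) :
    (rls.foldl (fun d x => d.insert x (f x)) d).getD r PySem.Set.empty = f r := by
  induction rls generalizing d with
  | nil => exact absurd hr (List.not_mem_nil)
  | cons x rls ih =>
      simp only [List.foldl_cons]
      rcases List.mem_cons.1 hr with rfl | hmem
      · rw [getD_foldl_not_mem _ _ _ _ (List.nodup_cons.1 hnd).1]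
        exact PySem.Dict.getD_insert_self _ _ _ _
      · exact ih _ hmem (List.Nodup.of_cons hnd)

-- A's second loop equals B's single loop, given duplicate-free blocks
theorem loopA2_eq_loopB (s : List Int) (rs : List Int)
    (hb : ∀ r ∈ rs, 1 ≤ r ∧ r ≤ (s.length : Int))
    (hnodup : ∀ r ∈ rs, (sumsOf s r.toNat).Nodup)
    (d : PySem.Dict Int (PySem.Set Int))
    (hd : ∀ r ∈ rs, d.getD r PySem.Set.empty = PySem.Set.ofList (sumsOf s r.toNat))
    (allsublens : PySem.Set Int) (prevMax : Int)
    (hmax : PySem.List.max? allsublens (fun x => x) = some prevMax) :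
    loopA2 d rs allsublens = loopB s rs prevMax := by
  induction rs generalizing allsublens prevMax with
  | nil => rfl
  | cons r rs ih =>
      have hr := hb r (List.mem_cons_self)
      have hn : (sumsOf s r.toNat).Nodup := hnodup r (List.mem_cons_self)
      have hsne : sumsOf s r.toNat ≠ [] := by
        simp only [sumsOf, ne_eq, List.map_eq_nil_iff]
        exact combs_ne_nil s r.toNat (by omega)
      have hcur : d.getD r PySem.Set.empty = PySem.Set.ofList (sumsOf s r.toNat) :=
        hd r (List.mem_cons_self)
      have hofl : PySem.Set.ofList (sumsOf s r.toNat) = sumsOf s r.toNat :=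
        PySem.Set.ofList_eq_self_of_nodup (sumsOf s r.toNat) hn
      have hsums : (PySem.List.combinations s r.toNat).map (fun c => c.sum)
          = sumsOf s r.toNat := rfl
      simp only [loopA2, loopB, hmax, hcur, hsums]
      rw [if_neg (show ¬ (PySem.Set.ofList (sumsOf s r.toNat)).length ≠ (sumsOf s r.toNat).length
        from fun h => h ((setLen_eq_iff_nodup (sumsOf s r.toNat)).2 hn))]
      cases hmn : PySem.List.min? (sumsOf s r.toNat) (fun x => x) with
      | none => exact absurd ((PySem.List.min?_eq_none_iff _ _).1 hmn) hsne
      | some mn =>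
      cases hmx : PySem.List.max? (sumsOf s r.toNat) (fun x => x) with
      | none => exact absurd ((PySem.List.max?_eq_none_iff _ _).1 hmx) hsne
      | some mx =>
      have hany : ((PySem.Set.ofList (sumsOf s r.toNat)).any
          (fun x => decide (x < prevMax))) = decide (mn < prevMax) := by
        rw [hofl]
        cases hlt : decide (mn < prevMax) with
        | true =>
            simp only [List.any_eq_true]
            have := PySem.List.min?_mem hmn
            exact ⟨mn, this, hlt⟩
        | false =>
            simp only [List.any_eq_false]
            intro x hx
            have h1 : mn ≤ x := PySem.List.min?_isMin hmn x hx
            have h2 : ¬ mn < prevMax := of_decide_eq_false hlt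
            simp only [decide_eq_true_eq] at *
            omega
      rw [hany]
      by_cases hlt : mn < prevMax
      · simp [hlt]
      · simp only [hlt, if_false]
        have hge : ∀ x ∈ sumsOf s r.toNat, prevMax ≤ x := by
          intro x hx
          have := PySem.List.min?_isMin hmn x hx
          omega
        have hmx_mem : mx ∈ sumsOf s r.toNat := PySem.List.max?_mem hmx
        have hmax' : PySem.List.max? (PySem.Set.union allsublens
            (PySem.Set.ofList (sumsOf s r.toNat))) (fun x => x) = some mx := by
          apply max?_eq_of_mem_of_forall_le
          · exact (PySem.Set.mem_union _ _ _).2 (Or.inr ((PySem.Set.mem_ofList _ _).2 hmx_mem))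
          · intro y hy
            rcases (PySem.Set.mem_union _ _ _).1 hy with h | h
            · have h1 : y ≤ prevMax := PySem.List.max?_isMax hmax y h
              have h2 : prevMax ≤ mx := hge mx hmx_mem
              omega
            · exact PySem.List.max?_isMax hmx y ((PySem.Set.mem_ofList _ _).1 h)
        exact ih (fun x hx => hb x (List.mem_cons_of_mem _ hx))
          (fun x hx => hnodup x (List.mem_cons_of_mem _ hx))
          (fun x hx => hd x (List.mem_cons_of_mem _ hx)) _ _ hmax'

-- B returns false as soon as any block has a duplicate sum
theorem loopB_false_of_dup (s : List Int) (rs : List Int) (prevMax : Int)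
    (hex : ∃ r ∈ rs, ¬ (sumsOf s r.toNat).Nodup) : loopB s rs prevMax = false := by
  induction rs generalizing prevMax with
  | nil => simp at hex
  | cons r rs ih =>
      simp only [loopB]
      by_cases hdup : (PySem.Set.ofList ((PySem.List.combinations s r.toNat).map
          (fun c => c.sum))).length ≠ ((PySem.List.combinations s r.toNat).map
          (fun c => c.sum)).length
      · rw [if_pos hdup]
      · rw [if_neg hdup]
        push_neg at hdup
        have hn : (sumsOf s r.toNat).Nodup := (setLen_eq_iff_nodup _).1 hdup
        have hex' : ∃ x ∈ rs, ¬ (sumsOf s x.toNat).Nodup := by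
          rcases hex with ⟨x, hx, hxn⟩
          rcases List.mem_cons.1 hx with rfl | hmem
          · exact absurd hn hxn
          · exact ⟨x, hmem, hxn⟩
        cases PySem.List.min? ((PySem.List.combinations s r.toNat).map (fun c => c.sum))
            (fun x => x) with
        | none =>
            cases PySem.List.max? ((PySem.List.combinations s r.toNat).map (fun c => c.sum))
                (fun x => x) <;> rfl
        | some mn =>
          cases PySem.List.max? ((PySem.List.combinations s r.toNat).map (fun c => c.sum))
              (fun x => x) with
          | none => rfl
          | some mx =>
              by_cases hlt : mn < prevMax
              · simp [hlt]
              · simp only [hlt, if_false]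
                exact ih _ hex'

-- ===== VERDICT (by name: the statement is the Claim_ definition above) =====
theorem checkoptold_spec : Claim_equal_checkoptold := by
  unfold Claim_equal_checkoptold Spec_checkoptold
  intro s _
  set rls := PySem.List.pyRange 1 ((s.length : Int) + 1) 1 with hrls
  have hb : ∀ r ∈ rls, 1 ≤ r ∧ r ≤ (s.length : Int) := by
    intro r hr
    rw [hrls, PySem.List.mem_pyRange_one] at hr
    omega
  have hnd : rls.Nodup := PySem.List.nodup_pyRange_one _ _
  have hblocks := loopA_blocks s rls hb hnd PySem.Dict.empty
    (fun r _ => PySem.Dict.contains_empty r)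
  have hsubsets : pySubsets s = rls.flatMap (fun r => PySem.List.combinations s r.toNat) := rfl
  unfold checkoptold checkoptold_alt
  rw [hsubsets, hblocks]
  by_cases hall : ∀ r ∈ rls, (sumsOf s r.toNat).Nodup
  · rw [if_pos hall]
    set D := rls.foldl (fun d r => d.insert r (PySem.Set.ofList (sumsOf s r.toNat)))
      PySem.Dict.empty with hD
    have hkeys : D.keys = rls := by
      rw [hD, PySem.Dict.keys_foldl_insert, PySem.Dict.keys_empty,
        PySem.Set.update_nil_left]
      exact PySem.Set.ofList_eq_self_of_nodup rls hnd
    have hsorted : PySem.List.sorted D.keys (fun x => x) false = rls := by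
      rw [hkeys]
      apply PySem.List.sorted_eq_self_of_pairwise
      exact (PySem.List.pairwise_lt_pyRange_one 1 ((s.length : Int) + 1)).imp le_of_lt
    simp only [hsorted]
    apply loopA2_eq_loopB s rls hb hall
    · intro r hr
      exact getD_foldl_mem rls _ _ r hr hnd
    · rfl
  · rw [if_neg hall]
    have : ∃ r ∈ rls, ¬ (sumsOf s r.toNat).Nodup := by
      push_neg at hall; exact hall
    rw [loopB_false_of_dup s rls 0 this]
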